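-- pv_equiv track=rewrite | github.com/PrairieLearn/PrairieLearn | elements/pl-file-preview/pl_file_preview_utils.py | order_files
-- ===== SOURCE A (Python) =====
-- from typing import List
--
-- def order_files(
--     submitted_files: List[dict], required_file_names: List[str]
-- ) -> List[dict]:
--     # Build mapping from required file name to its index
--     required_file_name_to_index = {
--         required_file_name: idx
--         for idx, required_file_name in enumerate(required_file_names)
--     }
--
--     # Sort submitted files by their index in the required file names list.
--     # Any files that don't appear in `required_file_names` will be placed
--     # at the end of the list.
--     return sorted(
--         submitted_files,
--         key=lambda file: required_file_name_to_index.get(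
--             file.get("name", None), len(required_file_names)
--         ),
--     )
-- ===== SOURCE B (Python) =====
-- from typing import List
--
--
-- def order_files(
--     submitted_files: List[dict], required_file_names: List[str]
-- ) -> List[dict]:
--     n = len(required_file_names)
--     # Last-occurrence index of each required name, built by a reverse scan
--     # with setdefault: walking indices n-1 down to 0, the first time a name
--     # is seen is its last occurrence, which matches the dict comprehension's
--     # last-index-wins behaviour.
--     last_index = {}
--     for i in range(n - 1, -1, -1):
--         last_index.setdefault(required_file_names[i], i)
--     # One-pass bucket distribution; bucket n collects non-required names.
--     buckets = [[] for _ in range(n + 1)]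
--     for f in submitted_files:
--         buckets[last_index.get(f.get("name"), n)].append(f)
--     # Concatenating the buckets in order reproduces the stable sorted order.
--     return [f for b in buckets for f in b]
-- ===== Notes on version B (the rewrite author's own statement) =====
-- stated objective: alternative
-- what changed: Replaces the keyed comparison sort over an enumerate-built dict with a reverse-scan setdefault map of last occurrences plus a single-pass bucket (counting-sort) distribution into n+1 buckets that are then concatenated.
import Mathlib
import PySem

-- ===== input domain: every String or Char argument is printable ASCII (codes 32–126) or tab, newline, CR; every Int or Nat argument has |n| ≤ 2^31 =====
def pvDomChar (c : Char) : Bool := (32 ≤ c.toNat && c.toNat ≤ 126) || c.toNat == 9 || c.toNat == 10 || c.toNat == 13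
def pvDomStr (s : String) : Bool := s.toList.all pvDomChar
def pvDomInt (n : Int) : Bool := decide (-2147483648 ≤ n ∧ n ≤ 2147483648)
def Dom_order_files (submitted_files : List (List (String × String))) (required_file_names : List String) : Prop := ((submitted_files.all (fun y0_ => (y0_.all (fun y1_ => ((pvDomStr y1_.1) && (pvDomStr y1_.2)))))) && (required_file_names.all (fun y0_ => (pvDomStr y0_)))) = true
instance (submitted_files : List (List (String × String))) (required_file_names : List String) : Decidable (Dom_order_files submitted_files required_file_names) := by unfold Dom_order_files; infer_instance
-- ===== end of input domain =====

-- B replaces the keyed comparison sort with a reverse-scan setdefault map of last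
-- occurrences plus a one-pass bucket distribution (bucket n = not required) and
-- concatenation of the buckets.

-- ===== PORT A =====
-- dict comprehension {name: idx for idx, name in enumerate(required_file_names)} (last index wins)
def pvIndexDictA (required_file_names : List String) : PySem.Dict String Int :=
  (PySem.List.enumerate required_file_names 0).foldl
    (fun acc p => acc.insert p.2 p.1) PySem.Dict.empty

def order_files (submitted_files : List (List (String × String))) (required_file_names : List String) : List (List (String × String)) :=
  let d := pvIndexDictA required_file_names
  -- sorted(submitted_files, key=lambda file: d.get(file.get("name", None), len(required_file_names)))
  -- file.get("name", None): when "name" is absent the outer lookup uses None, which is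
  -- never a key of d (its keys are strings), so it yields the default.
  PySem.List.sorted submitted_files
    (fun file =>
      match (PySem.Dict.mk file).get? "name" with
      | some nm => d.getD nm (required_file_names.length : Int)
      | none => (required_file_names.length : Int)) false

-- ===== PORT B =====
-- 'for i in range(n - 1, -1, -1): last_index.setdefault(required_file_names[i], i)',
-- ported as a countdown recursion carrying the dict (argument k: the next index
-- processed is k-1); the index is always in range, so required_file_names[i] is
-- pyGetD with a dummy default (exact there)
def pvLastIndexLoop (required_file_names : List String) (d : PySem.Dict String Int) : Nat → PySem.Dict String Int
  | 0 => d
  | k + 1 =>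
    pvLastIndexLoop required_file_names
      (d.setdefault (PySem.List.pyGetD required_file_names (k : Int) "") (k : Int)) k

def order_files_alt (submitted_files : List (List (String × String))) (required_file_names : List String) : List (List (String × String)) :=
  let n := required_file_names.length
  let last_index := pvLastIndexLoop required_file_names PySem.Dict.empty n
  -- buckets = [[] for _ in range(n + 1)]; for f: buckets[last_index.get(f.get("name"), n)].append(f)
  -- f.get("name"): an absent "name" yields None, never a key of last_index, so .get
  -- falls to the default n; the bucket index is a Python int always in [0, n], so
  -- .toNat is exact there
  let buckets :=
    submitted_files.foldl
      (fun bs f =>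
        bs.modify
          (match (PySem.Dict.mk f).get? "name" with
            | some nm => last_index.getD nm (n : Int)
            | none => (n : Int)).toNat
          (fun b => b ++ [f]))
      (List.replicate (n + 1) [])
  -- [f for b in buckets for f in b]
  buckets.flatMap (fun b => b)

-- ===== PRECONDITION & SPEC =====
def Spec_order_files (submitted_files : List (List (String × String))) (required_file_names : List String) (out : List (List (String × String))) : Prop := out = order_files_alt submitted_files required_file_names
instance (submitted_files : List (List (String × String))) (required_file_names : List String) (out : List (List (String × String))) : Decidable (Spec_order_files submitted_files required_file_names out) := by unfold Spec_order_files; infer_instance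

-- ===== CLAIM (what is proved, stated in full; the proofs are below) =====
def Claim_equal_order_files : Prop := ∀ (submitted_files : List (List (String × String))) (required_file_names : List String), Dom_order_files submitted_files required_file_names → Spec_order_files submitted_files required_file_names (order_files submitted_files required_file_names)

-- ===== LEMMAS AND PROOFS =====

-- A's sort key, named for the proofs
def pvKey (required_file_names : List String) (file : List (String × String)) : Int :=
  match (PySem.Dict.mk file).get? "name" with
  | some nm => (pvIndexDictA required_file_names).getD nm (required_file_names.length : Int)
  | none => (required_file_names.length : Int)

-- B's bucket index (as an Int), named for the proofs
def pvKeyB (required_file_names : List String) (file : List (String × String)) : Int :=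
  match (PySem.Dict.mk file).get? "name" with
  | some nm =>
    (pvLastIndexLoop required_file_names PySem.Dict.empty required_file_names.length).getD nm
      (required_file_names.length : Int)
  | none => (required_file_names.length : Int)

-- proof-side common spec: reverse search with an explicit default
def pvF (req : List String) (nm : String) (dflt : Int) : Nat → Int
  | 0 => dflt
  | k + 1 =>
    if PySem.List.pyGet? req (k : Int) = some nm then (k : Int)
    else pvF req nm dflt k

theorem pv_F_append (req : List String) (s nm : String) (dflt : Int) (k : Nat)
    (hk : k ≤ req.length) : pvF (req ++ [s]) nm dflt k = pvF req nm dflt k := by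
  induction k with
  | zero => rfl
  | succ k ih =>
    simp only [pvF, PySem.List.pyGet?_natCast]
    rw [List.getElem?_append_left (by omega), ih (by omega)]

-- A's dict lookup is the reverse search
theorem pv_getD_eq_F (req : List String) (nm : String) (dflt : Int) :
    (pvIndexDictA req).getD nm dflt = pvF req nm dflt req.length := by
  induction req using List.reverseRecOn with
  | nil => simp [pvIndexDictA, PySem.List.enumerate_nil, PySem.Dict.getD_empty, pvF]
  | append_singleton req s ih =>
    unfold pvIndexDictA
    rw [PySem.List.enumerate_append, PySem.List.enumerate_cons, PySem.List.enumerate_nil,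
      List.foldl_append]
    simp only [List.foldl_cons, List.foldl_nil]
    rw [PySem.Dict.getD_insert]
    have hlen : (req ++ [s]).length = req.length + 1 := by simp
    rw [hlen]
    have hget : PySem.List.pyGet? (req ++ [s]) ((req.length : Nat) : Int) = some s := by
      rw [PySem.List.pyGet?_natCast]
      simp
    by_cases he : nm = s
    · rw [if_pos he]
      show (0 + (req.length : Int)) = pvF (req ++ [s]) nm dflt (req.length + 1)
      simp only [pvF, hget, he]
      simp
    · rw [if_neg he]
      have : pvF (req ++ [s]) nm dflt (req.length + 1) = pvF (req ++ [s]) nm dflt req.length := by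
        simp only [pvF, hget]
        rw [if_neg (by simpa [eq_comm] using he)]
      rw [this, pv_F_append _ _ _ _ _ le_rfl]
      exact ih

-- B's setdefault countdown loop also computes the reverse search
theorem pv_lastIndexLoop_getD (req : List String) (nm : String) (dflt : Int) :
    ∀ (k : Nat), k ≤ req.length → ∀ (d : PySem.Dict String Int),
      (pvLastIndexLoop req d k).getD nm dflt =
        if d.contains nm then d.getD nm dflt else pvF req nm dflt k := by
  intro k
  induction k with
  | zero =>
    intro _ d
    cases hc : d.contains nm with
    | true => simp [pvLastIndexLoop]
    | false => simp [pvLastIndexLoop, pvF, PySem.Dict.getD_of_not_contains d dflt hc]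
  | succ k ih =>
    intro hk d
    have hkl : k < req.length := by omega
    have hs : PySem.List.pyGetD req ((k : Nat) : Int) "" = req[k] := by
      rw [PySem.List.pyGetD_natCast, List.getD_eq_getElem?_getD, List.getElem?_eq_getElem hkl]
      rfl
    have hget : PySem.List.pyGet? req ((k : Nat) : Int) = some req[k] := by
      rw [PySem.List.pyGet?_natCast, List.getElem?_eq_getElem hkl]
    show (pvLastIndexLoop req (d.setdefault (PySem.List.pyGetD req ((k : Nat) : Int) "") (k : Int)) k).getD nm dflt = _
    rw [ih (by omega), hs]
    cases hc : d.contains nm with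
    | true =>
      -- nm already bound: setdefault never changes its binding
      cases hcs : d.contains req[k] with
      | true => simp [PySem.Dict.setdefault_of_contains d _ hcs, hc]
      | false =>
        rw [PySem.Dict.setdefault_of_not_contains d _ hcs]
        have hne : nm ≠ req[k] := by
          intro h; rw [h] at hc; rw [hc] at hcs; cases hcs
        simp [PySem.Dict.contains_insert, PySem.Dict.getD_insert, hc, hne]
    | false =>
      by_cases he : req[k] = nm
      · -- first (= last-occurrence) hit: setdefault inserts, the search returns k
        have hcs : d.contains req[k] = false := by rw [he]; exact hc
        rw [PySem.Dict.setdefault_of_not_contains d _ hcs, he]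
        simp [pvF, hget, he]
      · -- different name: contains nm unchanged, the search steps down
        have hstep : (d.setdefault req[k] (k : Int)).contains nm = false := by
          cases hcs : d.contains req[k] with
          | true => rw [PySem.Dict.setdefault_of_contains d _ hcs]; exact hc
          | false =>
            rw [PySem.Dict.setdefault_of_not_contains d _ hcs, PySem.Dict.contains_insert, hc]
            simp only [Bool.or_false, beq_eq_false_iff_ne, ne_eq]
            exact fun h => he h.symm
        rw [hstep]
        simp only [if_false, Bool.false_eq_true]
        have : pvF req nm dflt (k + 1) = pvF req nm dflt k := by
          simp only [pvF, hget]
          rw [if_neg (by simpa using he)]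
        rw [this]

theorem pvKey_eq_pvKeyB (req : List String) (file : List (String × String)) :
    pvKey req file = pvKeyB req file := by
  unfold pvKey pvKeyB
  cases (PySem.Dict.mk file).get? "name" with
  | none => rfl
  | some nm =>
    simp only [pv_getD_eq_F,
      pv_lastIndexLoop_getD req nm (req.length : Int) req.length le_rfl PySem.Dict.empty,
      PySem.Dict.contains_empty, if_false, Bool.false_eq_true]

-- a getD of the foldl-insert dict is the default or one of the inserted values
theorem pv_getD_foldl_insert_cases (l : List (Int × String)) (d : PySem.Dict String Int)
    (nm : String) (dflt : Int) :
    (l.foldl (fun acc p => acc.insert p.2 p.1) d).getD nm dflt = d.getD nm dflt ∨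
      ∃ p ∈ l, (l.foldl (fun acc p => acc.insert p.2 p.1) d).getD nm dflt = p.1 := by
  induction l generalizing d with
  | nil => exact Or.inl rfl
  | cons q l ih =>
    simp only [List.foldl_cons]
    rcases ih (d.insert q.2 q.1) with h | ⟨p, hp, hv⟩
    · rw [h, PySem.Dict.getD_insert]
      split_ifs with he
      · exact Or.inr ⟨q, List.mem_cons_self, rfl⟩
      · exact Or.inl rfl
    · exact Or.inr ⟨p, List.mem_cons_of_mem _ hp, hv⟩

theorem pvKey_bounds (r : List String) (file : List (String × String)) :
    0 ≤ pvKey r file ∧ pvKey r file ≤ (r.length : Int) := by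
  unfold pvKey
  cases h : (PySem.Dict.mk file).get? "name" with
  | none => exact ⟨Int.natCast_nonneg _, le_refl _⟩
  | some nm =>
    simp only []
    rcases pv_getD_foldl_insert_cases (PySem.List.enumerate r 0) PySem.Dict.empty nm
      (r.length : Int) with hd | ⟨p, hp, hv⟩
    · unfold pvIndexDictA
      rw [hd, PySem.Dict.getD_empty]
      constructor <;> omega
    · rcases (PySem.List.mem_enumerate_iff _ _ _).1 hp with ⟨k, hk, rfl⟩
      unfold pvIndexDictA
      rw [hv]
      constructor <;> [omega; skip]
      have : (k : Int) < (r.length : Int) := by exact_mod_cast hk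
      omega

-- insertBy passes over elements it does not go before
theorem pv_insertBy_append {α : Type} (before : α → α → Bool) (x : α) (l r : List α)
    (h : ∀ y ∈ l, before x y = false) :
    PySem.List.insertBy before x (l ++ r) = l ++ PySem.List.insertBy before x r := by
  induction l with
  | nil => rfl
  | cons a l ih =>
    rw [List.cons_append, PySem.List.insertBy, h a List.mem_cons_self]
    simp only [Bool.false_eq_true, if_false, List.cons_append]
    rw [ih (fun y hy => h y (List.mem_cons_of_mem _ hy))]

theorem pv_insertBy_front {α : Type} (before : α → α → Bool) (x : α) (r : List α)
    (h : ∀ y ∈ r, before x y = true) :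
    PySem.List.insertBy before x r = x :: r := by
  cases r with
  | nil => rfl
  | cons a t =>
    rw [PySem.List.insertBy, h a List.mem_cons_self]
    simp

-- stability: the stable sort by an Int key with values in [0, n] is the concatenation of the key buckets
theorem pv_sorted_buckets {α : Type} (key : α → Int) (n : Nat) :
    ∀ (xs : List α), (∀ x ∈ xs, 0 ≤ key x ∧ key x ≤ (n : Int)) →
      PySem.List.sorted xs key false =
        (List.range (n + 1)).flatMap (fun (i : Nat) => xs.filter (fun x => key x == ((i : Nat) : Int))) := by
  intro xs
  induction xs using List.reverseRecOn with
  | nil => simp [PySem.List.sorted_eq_foldl_insertBy]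
  | append_singleton xs x ih =>
    intro h
    have hx := h x (by simp)
    have hxs : ∀ y ∈ xs, 0 ≤ key y ∧ key y ≤ (n : Int) := fun y hy => h y (by simp [hy])
    obtain ⟨k, hk, hkn⟩ : ∃ k : Nat, key x = (k : Int) ∧ k ≤ n := ⟨(key x).toNat, by omega, by omega⟩
    rw [PySem.List.sorted_eq_foldl_insertBy, List.foldl_append, List.foldl_cons, List.foldl_nil,
      ← PySem.List.sorted_eq_foldl_insertBy, ih hxs]
    have hsplit : n + 1 = (k + 1) + (n - k) := by omega
    rw [hsplit, List.range_add, List.flatMap_append, List.flatMap_append]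
    rw [pv_insertBy_append _ _ _ _ (by
      intro y hy
      rcases List.mem_flatMap.1 hy with ⟨i, hi, hyf⟩
      have hik : i < k + 1 := List.mem_range.1 hi
      have hky : key y = (i : Int) := by simpa using (List.mem_filter.1 hyf).2
      show decide (key x < key y) = false
      rw [decide_eq_false_iff_not, hk, hky]
      omega)]
    rw [pv_insertBy_front _ _ _ (by
      intro y hy
      rcases List.mem_flatMap.1 hy with ⟨i, hi, hyf⟩
      rcases List.mem_map.1 hi with ⟨j, _, rfl⟩
      have hky : key y = ((k + 1 + j : Nat) : Int) := by simpa using (List.mem_filter.1 hyf).2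
      show decide (key x < key y) = true
      rw [decide_eq_true_eq, hk, hky]
      push_cast
      omega)]
    -- right (high) buckets do not change: key x = k < k+1+j
    have hhigh : ((List.range (n - k)).map (fun j => k + 1 + j)).flatMap
          (fun (i : Nat) => (xs ++ [x]).filter (fun y => key y == ((i : Nat) : Int))) =
        ((List.range (n - k)).map (fun j => k + 1 + j)).flatMap
          (fun (i : Nat) => xs.filter (fun y => key y == ((i : Nat) : Int))) := by
      apply List.flatMap_congr
      intro i hi
      rcases List.mem_map.1 hi with ⟨j, _, rfl⟩
      rw [List.filter_append]
      have hf : (key x == ((k + 1 + j : Nat) : Int)) = false := by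
        rw [hk]
        simp only [beq_eq_false_iff_ne, ne_eq]
        push_cast
        omega
      rw [List.filter_singleton, hf, cond_false, List.append_nil]
    rw [hhigh]
    -- left (low) buckets: bucket k gains x at its end, buckets below k are unchanged
    have hlow : (List.range (k + 1)).flatMap
          (fun (i : Nat) => (xs ++ [x]).filter (fun y => key y == ((i : Nat) : Int))) =
        ((List.range (k + 1)).flatMap
          (fun (i : Nat) => xs.filter (fun y => key y == ((i : Nat) : Int)))) ++ [x] := by
      rw [List.range_succ, List.flatMap_append, List.flatMap_append]
      have hlt : (List.range k).flatMap
            (fun (i : Nat) => (xs ++ [x]).filter (fun y => key y == ((i : Nat) : Int))) =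
          (List.range k).flatMap
            (fun (i : Nat) => xs.filter (fun y => key y == ((i : Nat) : Int))) := by
        apply List.flatMap_congr
        intro i hi
        have hik : i < k := List.mem_range.1 hi
        rw [List.filter_append]
        have hf : (key x == ((i : Nat) : Int)) = false := by
          rw [hk]
          simp only [beq_eq_false_iff_ne, ne_eq]
          omega
        rw [List.filter_singleton, hf, cond_false, List.append_nil]
      rw [hlt]
      have hbk : ([k] : List Nat).flatMap
            (fun (i : Nat) => (xs ++ [x]).filter (fun y => key y == ((i : Nat) : Int))) =
          (([k] : List Nat).flatMap
            (fun (i : Nat) => xs.filter (fun y => key y == ((i : Nat) : Int)))) ++ [x] := by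
        simp only [List.flatMap_cons, List.flatMap_nil, List.append_nil, List.filter_append]
        have ht : (key x == ((k : Nat) : Int)) = true := by simp [hk]
        rw [List.filter_singleton, ht, cond_true]
      rw [hbk, List.append_assoc]
    rw [hlow, List.append_assoc, List.singleton_append]

-- B's bucket-distribution loop, characterised bucket by bucket
theorem pv_buckets_foldl {α : Type} (key : α → Nat) :
    ∀ (xs : List α) (bs : List (List α)), (∀ x ∈ xs, key x < bs.length) →
      xs.foldl (fun b f => b.modify (key f) (fun l => l ++ [f])) bs =
        List.mapIdx (fun i l => l ++ xs.filter (fun x => key x == i)) bs := by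
  intro xs
  induction xs with
  | nil =>
    intro bs _
    apply List.ext_getElem (by simp)
    intro i h1 h2
    simp [List.getElem_mapIdx]
  | cons x xs ih =>
    intro bs h
    simp only [List.foldl_cons]
    rw [ih _ (by intro y hy; rw [List.length_modify]; exact h y (List.mem_cons_of_mem _ hy))]
    apply List.ext_getElem (by simp [List.length_modify])
    intro i h1 h2
    rw [List.getElem_mapIdx, List.getElem_mapIdx, List.getElem_modify]
    by_cases hik : key x = i
    · rw [if_pos hik, List.filter_cons, if_pos (by simp [hik])]
      simp [List.append_assoc]
    · rw [if_neg hik, List.filter_cons, if_neg (by simpa using hik)]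

-- mapIdx over the empty buckets is the bucket list indexed by range; flattening gives flatMap
theorem pv_flatten_replicate_mapIdx {α : Type} (n : Nat) (F : Nat → List α) :
    (List.mapIdx (fun i l => l ++ F i) (List.replicate (n + 1) ([] : List α))).flatMap (fun b => b) =
      (List.range (n + 1)).flatMap F := by
  have : List.mapIdx (fun i l => l ++ F i) (List.replicate (n + 1) ([] : List α)) =
      (List.range (n + 1)).map F := by
    apply List.ext_getElem (by simp)
    intro i h1 h2
    rw [List.getElem_mapIdx, List.getElem_replicate, List.getElem_map, List.getElem_range]
    simp
  rw [this, List.flatMap_map]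

theorem pv_A_eq (sub : List (List (String × String))) (req : List String) :
    order_files sub req =
      (List.range (req.length + 1)).flatMap
        (fun (i : Nat) => sub.filter (fun x => pvKey req x == ((i : Nat) : Int))) := by
  have : order_files sub req = PySem.List.sorted sub (pvKey req) false := rfl
  rw [this]
  exact pv_sorted_buckets (pvKey req) req.length sub (fun x _ => pvKey_bounds req x)

theorem pvKeyB_bounds (r : List String) (file : List (String × String)) :
    0 ≤ pvKeyB r file ∧ pvKeyB r file ≤ (r.length : Int) := by
  rw [← pvKey_eq_pvKeyB]
  exact pvKey_bounds r file

theorem pv_B_eq (sub : List (List (String × String))) (req : List String) :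
    order_files_alt sub req =
      (List.range (req.length + 1)).flatMap
        (fun (i : Nat) => sub.filter (fun x => (pvKeyB req x).toNat == i)) := by
  have hB : order_files_alt sub req =
      (sub.foldl (fun bs f => bs.modify ((pvKeyB req f).toNat) (fun l => l ++ [f]))
        (List.replicate (req.length + 1) [])).flatMap (fun b => b) := rfl
  rw [hB, pv_buckets_foldl (fun f => (pvKeyB req f).toNat) sub _ (by
    intro x _
    rw [List.length_replicate]
    show (pvKeyB req x).toNat < req.length + 1
    have := pvKeyB_bounds req x
    omega)]
  rw [pv_flatten_replicate_mapIdx]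

-- ===== VERDICT (by name: the statement is the Claim_ definition above) =====
theorem order_files_spec : Claim_equal_order_files := by
  intro sub req _
  unfold Spec_order_files
  rw [pv_A_eq, pv_B_eq]
  apply List.flatMap_congr
  intro i _
  apply List.filter_congr
  intro x _
  obtain ⟨h0, h1⟩ := pvKeyB_bounds req x
  rw [pvKey_eq_pvKeyB, Bool.eq_iff_iff]
  simp only [beq_iff_eq]
  show pvKeyB req x = (i : Int) ↔ (pvKeyB req x).toNat = i
  omega
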